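-- pv_equiv track=rewrite | github.com/aqeeladam20/OMEX | complete_branding_replacement.py | replace_erpnext_in_text
-- ===== SOURCE A (Python) =====
-- def replace_erpnext_in_text(text):
--     """Replace all variations of ERPNext with OMEX in text"""
--     replacements = [
--         # Direct replacements
--         ('ERPNext', 'OMEX'),
--         ('Erpnext', 'OMEX'),
--         ('erpnext', 'OMEX'),
--         ('ERPNEXT', 'OMEX'),
--
--         # Context-aware replacements
--         ('ERPNext ERP', 'OMEX ERP'),
--         ('ERPNext system', 'OMEX ERP system'),
--         ('ERPNext application', 'OMEX ERP application'),
--         ('ERPNext software', 'OMEX ERP software'),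
--         ('ERPNext platform', 'OMEX ERP platform'),
--         ('in ERPNext', 'in OMEX ERP'),
--         ('to ERPNext', 'to OMEX ERP'),
--         ('from ERPNext', 'from OMEX ERP'),
--         ('using ERPNext', 'using OMEX ERP'),
--         ('with ERPNext', 'with OMEX ERP'),
--
--         # Technical references
--         ('ERPNext will', 'OMEX ERP will'),
--         ('ERPNext allows', 'OMEX ERP allows'),
--         ('ERPNext uses', 'OMEX ERP uses'),
--         ('ERPNext provides', 'OMEX ERP provides'),
--         ('ERPNext has', 'OMEX ERP has'),
--         ('ERPNext can', 'OMEX ERP can'),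
--         ('ERPNext enables', 'OMEX ERP enables'),
--         ('ERPNext supports', 'OMEX ERP supports'),
--
--         # Documentation specific
--         ('ERPNext documentation', 'OMEX ERP documentation'),
--         ('ERPNext manual', 'OMEX ERP manual'),
--         ('ERPNext help', 'OMEX ERP help'),
--         ('ERPNext guide', 'OMEX ERP guide'),
--
--         # Version references
--         ('ERPNext v', 'OMEX ERP v'),
--         ('ERPNext version', 'OMEX ERP version'),
--
--         # Installation and setup
--         ('install ERPNext', 'install OMEX ERP'),
--         ('setup ERPNext', 'setup OMEX ERP'),
--         ('configure ERPNext', 'configure OMEX ERP'),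
--     ]
--
--     for old, new in replacements:
--         text = text.replace(old, new)
--
--     return text
-- ===== SOURCE B (Python) =====
-- def replace_erpnext_in_text(text):
--     """Replace all variations of ERPNext with OMEX in text.
--
--     Single left-to-right scan: the first rule of the original table
--     ('ERPNext' -> 'OMEX') already removes every 'ERPNext' substring, so the
--     context-aware rules can never match; only the four exact-case variants matter.
--     """
--     variants = ('ERPNext', 'Erpnext', 'erpnext', 'ERPNEXT')
--     out = []
--     i = 0
--     n = len(text)
--     while i < n:
--         if any(text.startswith(v, i) for v in variants):
--             out.append('OMEX')
--             i += 7
--         else: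
--             out.append(text[i])
--             i += 1
--     return ''.join(out)
-- ===== Notes on version B (the rewrite author's own statement) =====
-- stated objective: alternative
-- what changed: Replaced the 31-entry sequential replace loop (31 full passes over the string) with a single left-to-right scan that matches the four exact-case variants, exploiting the fact that the first rule already deletes every 'ERPNext' substring so all 27 context-aware rules are dead.
import Mathlib
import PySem

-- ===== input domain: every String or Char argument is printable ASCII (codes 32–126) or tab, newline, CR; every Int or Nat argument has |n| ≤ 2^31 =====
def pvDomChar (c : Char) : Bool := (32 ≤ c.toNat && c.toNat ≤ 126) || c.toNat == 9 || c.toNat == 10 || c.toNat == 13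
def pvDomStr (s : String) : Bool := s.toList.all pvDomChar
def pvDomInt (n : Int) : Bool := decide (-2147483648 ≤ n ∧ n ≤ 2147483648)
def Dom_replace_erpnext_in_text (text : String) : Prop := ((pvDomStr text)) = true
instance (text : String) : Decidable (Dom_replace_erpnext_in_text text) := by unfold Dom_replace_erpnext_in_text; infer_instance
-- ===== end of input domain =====

-- B replaces A's 31 sequential str.replace passes with a single left-to-right scan matching the
-- four exact-case variants (A's first rule already deletes every 'ERPNext' substring, so its 27
-- context-aware rules can never match); proved equal on all inputs. One pass instead of 31.


-- ===== PORT A =====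
-- A's replacement table, verbatim
def pvReplacements : List (String × String) :=
  [ ("ERPNext", "OMEX"),
    ("Erpnext", "OMEX"),
    ("erpnext", "OMEX"),
    ("ERPNEXT", "OMEX"),
    ("ERPNext ERP", "OMEX ERP"),
    ("ERPNext system", "OMEX ERP system"),
    ("ERPNext application", "OMEX ERP application"),
    ("ERPNext software", "OMEX ERP software"),
    ("ERPNext platform", "OMEX ERP platform"),
    ("in ERPNext", "in OMEX ERP"),
    ("to ERPNext", "to OMEX ERP"),
    ("from ERPNext", "from OMEX ERP"),
    ("using ERPNext", "using OMEX ERP"),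
    ("with ERPNext", "with OMEX ERP"),
    ("ERPNext will", "OMEX ERP will"),
    ("ERPNext allows", "OMEX ERP allows"),
    ("ERPNext uses", "OMEX ERP uses"),
    ("ERPNext provides", "OMEX ERP provides"),
    ("ERPNext has", "OMEX ERP has"),
    ("ERPNext can", "OMEX ERP can"),
    ("ERPNext enables", "OMEX ERP enables"),
    ("ERPNext supports", "OMEX ERP supports"),
    ("ERPNext documentation", "OMEX ERP documentation"),
    ("ERPNext manual", "OMEX ERP manual"),
    ("ERPNext help", "OMEX ERP help"),
    ("ERPNext guide", "OMEX ERP guide"),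
    ("ERPNext v", "OMEX ERP v"),
    ("ERPNext version", "OMEX ERP version"),
    ("install ERPNext", "install OMEX ERP"),
    ("setup ERPNext", "setup OMEX ERP"),
    ("configure ERPNext", "configure OMEX ERP") ]

def replace_erpnext_in_text (text : String) : String :=
  pvReplacements.foldl (fun t p => PySem.Str.replace t p.1 p.2) text

-- ===== PORT B =====
-- Source B's tuple of the four variant literals
def pvVariants : List (List Char) :=
  ["ERPNext".toList, "Erpnext".toList, "erpnext".toList, "ERPNEXT".toList]

-- Source B's while loop: at the current position, if a variant starts here emit "OMEX" and skip
-- 7 characters, otherwise emit the character and advance by one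
def pvScan : List Char → List Char
  | [] => []
  | c :: t =>
    if pvVariants.any (fun v => v.isPrefixOf (c :: t)) then
      "OMEX".toList ++ pvScan (List.drop 6 t)
    else
      c :: pvScan t
termination_by l => l.length
decreasing_by all_goals (simp [List.length_drop]; try omega)

def replace_erpnext_in_text_alt (text : String) : String :=
  String.ofList (pvScan text.toList)

-- ===== PRECONDITION & SPEC =====
def Spec_replace_erpnext_in_text (text : String) (out : String) : Prop := out = replace_erpnext_in_text_alt text
instance (text : String) (out : String) : Decidable (Spec_replace_erpnext_in_text text out) := by unfold Spec_replace_erpnext_in_text; infer_instance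

-- ===== CLAIM (what is proved, stated in full; the proofs are below) =====
def Claim_equal_replace_erpnext_in_text : Prop := ∀ (text : String), Dom_replace_erpnext_in_text text → Spec_replace_erpnext_in_text text (replace_erpnext_in_text text)

-- ===== LEMMAS AND PROOFS =====

-- structural model of Python's str.replace for a nonempty pattern: leftmost,
-- non-overlapping, left to right
def pvSrep (old new : List Char) : List Char → List Char
  | [] => []
  | c :: t =>
    if old.isPrefixOf (c :: t) && !old.isEmpty then
      new ++ pvSrep old new (List.drop (old.length - 1) t)
    else
      c :: pvSrep old new t
termination_by l => l.length
decreasing_by all_goals (simp [List.length_drop]; try omega)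

lemma pvGo_eq (old new : List Char) (hold : old ≠ []) :
    ∀ fuel l acc, l.length ≤ fuel →
      PySem.Chars.replace.go old new fuel l acc = acc.reverse ++ pvSrep old new l := by
  intro fuel
  induction fuel with
  | zero =>
    intro l acc h
    have : l = [] := List.length_eq_zero_iff.mp (Nat.le_zero.mp h)
    subst this
    simp [PySem.Chars.replace.go, pvSrep]
  | succ n ih =>
    intro l acc h
    match l with
    | [] => simp [PySem.Chars.replace.go, pvSrep]
    | c :: t =>
      rw [PySem.Chars.replace.go]
      by_cases hp : old.isPrefixOf (c :: t)
      · have hne : old.isEmpty = false := by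
          cases old with | nil => exact absurd rfl hold | cons a b => rfl
        rw [if_pos hp]
        have hlen : 1 ≤ old.length := by
          cases old with | nil => exact absurd rfl hold | cons a b => simp
        have hdrop : List.drop old.length (c :: t) = List.drop (old.length - 1) t := by
          cases old with | nil => exact absurd rfl hold | cons a b => simp
        have hdl : (List.drop (old.length - 1) t).length ≤ n := by
          simp [List.length_drop]
          simp at h
          omega
        rw [hdrop, ih _ _ hdl]
        conv_rhs => rw [pvSrep]
        rw [if_pos (by simp [hp, hne])]
        simp
      · rw [if_neg hp]
        have : t.length ≤ n := by simp at h; omega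
        rw [ih _ _ this]
        conv_rhs => rw [pvSrep]
        rw [if_neg (by simp [hp])]
        simp

lemma pvReplace_eq (old new l : List Char) (hold : old ≠ []) :
    PySem.Chars.replace l old new = pvSrep old new l := by
  rw [PySem.Chars.replace]
  have : old.isEmpty = false := by
    cases old with | nil => exact absurd rfl hold | cons a b => rfl
  rw [this]
  simp only [Bool.false_eq_true, if_false]
  exact pvGo_eq old new hold l.length l [] le_rfl

def pvOcc (p : List Char) : List Char → Bool
  | [] => false
  | c :: t => p.isPrefixOf (c :: t) || pvOcc p t

lemma pvOcc_prefix_trans (p : List Char) : ∀ (s q : List Char),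
    pvOcc q p = true → p.isPrefixOf s = true → pvOcc q s = true := by
  induction p with
  | nil => intro s q h; simp [pvOcc] at h
  | cons c t ih =>
    intro s q h hp
    match s with
    | [] => simp [List.isPrefixOf] at hp
    | c' :: s' =>
      simp only [List.isPrefixOf, Bool.and_eq_true, beq_iff_eq] at hp
      obtain ⟨rfl, hts⟩ := hp
      rw [pvOcc] at h
      rcases Bool.or_eq_true_iff.mp h with hq | hq
      · have h1 : q <+: (c :: t) := List.isPrefixOf_iff_prefix.mp hq
        have h2 : (c :: t) <+: (c :: s') := by
          have := List.isPrefixOf_iff_prefix.mp hts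
          exact List.cons_prefix_cons.mpr ⟨rfl, this⟩
        have h3 : q <+: (c :: s') := h1.trans h2
        rw [pvOcc]
        simp [List.isPrefixOf_iff_prefix.mpr h3]
      · rw [pvOcc]
        simp [ih s' q hq hts]

lemma pvSrep_id (old new l : List Char) (h1 : pvOcc "ERPNext".toList old = true)
    (h2 : pvOcc "ERPNext".toList l = false) : pvSrep old new l = l := by
  induction l with
  | nil => rw [pvSrep]
  | cons c t ih =>
    rw [pvOcc] at h2
    simp only [Bool.or_eq_false_iff] at h2
    obtain ⟨hpre, ht⟩ := h2
    have hocc : pvOcc "ERPNext".toList (c :: t) = false := by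
      rw [pvOcc]; simp only [Bool.or_eq_false_iff]; exact ⟨hpre, ht⟩
    have hp : old.isPrefixOf (c :: t) = false := by
      by_contra hcon
      have := pvOcc_prefix_trans old (c :: t) "ERPNext".toList h1
        (Bool.of_not_eq_false hcon)
      rw [this] at hocc
      exact absurd hocc (by simp)
    rw [pvSrep, hp]
    simp [ih ht]

lemma pvSrep_prefix_reflect (old : List Char) (n : Nat) : ∀ l, l.length ≤ n →
    ∀ w : List Char, 'O' ∉ w → w.isPrefixOf (pvSrep old "OMEX".toList l) = true →
      w.isPrefixOf l = true := by
  induction n with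
  | zero =>
    intro l hl w _ h
    have : l = [] := List.length_eq_zero_iff.mp (Nat.le_zero.mp hl)
    subst this
    rw [pvSrep] at h
    exact h
  | succ n ih =>
    intro l hl w hO h
    match l with
    | [] => rw [pvSrep] at h; exact h
    | c :: t =>
      match w with
      | [] => rfl
      | a :: w' =>
        rw [pvSrep] at h
        by_cases hp : old.isPrefixOf (c :: t) && !old.isEmpty
        · rw [if_pos hp, show "OMEX".toList = ['O','M','E','X'] from rfl] at h
          -- pvSrep … = 'O'::'M'::'E'::'X' ++ _, so a = 'O', contradiction
          simp only [List.cons_append, List.isPrefixOf, Bool.and_eq_true, beq_iff_eq] at h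
          have : a = 'O' := by simpa using h.1
          exact absurd (this ▸ List.mem_cons_self) hO
        · rw [if_neg hp] at h
          simp only [List.isPrefixOf, Bool.and_eq_true, beq_iff_eq] at h ⊢
          refine ⟨h.1, ?_⟩
          have hO' : 'O' ∉ w' := fun hm => hO (List.mem_cons_of_mem a hm)
          have hlt : t.length ≤ n := by simp at hl; omega
          exact ih t hlt w' hO' h.2

lemma pvScan_prefix_reflect (n : Nat) : ∀ l, l.length ≤ n →
    ∀ w : List Char, 'O' ∉ w → w.isPrefixOf (pvScan l) = true → w.isPrefixOf l = true := by
  induction n with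
  | zero =>
    intro l hl w _ h
    have : l = [] := List.length_eq_zero_iff.mp (Nat.le_zero.mp hl)
    subst this
    rw [pvScan] at h
    exact h
  | succ n ih =>
    intro l hl w hO h
    match l with
    | [] => rw [pvScan] at h; exact h
    | c :: t =>
      match w with
      | [] => rfl
      | a :: w' =>
        rw [pvScan] at h
        by_cases hp : pvVariants.any (fun v => v.isPrefixOf (c :: t))
        · rw [if_pos hp, show "OMEX".toList = ['O','M','E','X'] from rfl] at h
          simp only [List.cons_append, List.isPrefixOf, Bool.and_eq_true, beq_iff_eq] at h
          have : a = 'O' := by simpa using h.1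
          exact absurd (this ▸ List.mem_cons_self) hO
        · rw [if_neg hp] at h
          simp only [List.isPrefixOf, Bool.and_eq_true, beq_iff_eq] at h ⊢
          refine ⟨h.1, ?_⟩
          have hO' : 'O' ∉ w' := fun hm => hO (List.mem_cons_of_mem a hm)
          have hlt : t.length ≤ n := by simp at hl; omega
          exact ih t hlt w' hO' h.2

lemma pvPushOM_2 (y : List Char) : pvSrep ['E','r','p','n','e','x','t'] ['O','M','E','X'] (['O','M','E','X'] ++ y) = ['O','M','E','X'] ++ pvSrep ['E','r','p','n','e','x','t'] ['O','M','E','X'] y := by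
  simp [pvSrep, List.isPrefixOf]

lemma pvPushOM_3 (y : List Char) : pvSrep ['e','r','p','n','e','x','t'] ['O','M','E','X'] (['O','M','E','X'] ++ y) = ['O','M','E','X'] ++ pvSrep ['e','r','p','n','e','x','t'] ['O','M','E','X'] y := by
  simp [pvSrep, List.isPrefixOf]

lemma pvPushOM_4 (y : List Char) : pvSrep ['E','R','P','N','E','X','T'] ['O','M','E','X'] (['O','M','E','X'] ++ y) = ['O','M','E','X'] ++ pvSrep ['E','R','P','N','E','X','T'] ['O','M','E','X'] y := by
  simp [pvSrep, List.isPrefixOf]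

lemma pvPushW_1_2 (y : List Char) : pvSrep ['E','R','P','N','e','x','t'] ['O','M','E','X'] (['E','r','p','n','e','x','t'] ++ y) = ['E','r','p','n','e','x','t'] ++ pvSrep ['E','R','P','N','e','x','t'] ['O','M','E','X'] y := by
  simp [pvSrep, List.isPrefixOf]

lemma pvPushW_1_3 (y : List Char) : pvSrep ['E','R','P','N','e','x','t'] ['O','M','E','X'] (['e','r','p','n','e','x','t'] ++ y) = ['e','r','p','n','e','x','t'] ++ pvSrep ['E','R','P','N','e','x','t'] ['O','M','E','X'] y := by
  simp [pvSrep, List.isPrefixOf]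

lemma pvPushW_2_3 (y : List Char) : pvSrep ['E','r','p','n','e','x','t'] ['O','M','E','X'] (['e','r','p','n','e','x','t'] ++ y) = ['e','r','p','n','e','x','t'] ++ pvSrep ['E','r','p','n','e','x','t'] ['O','M','E','X'] y := by
  simp [pvSrep, List.isPrefixOf]

lemma pvPushW_1_4 (y : List Char) : pvSrep ['E','R','P','N','e','x','t'] ['O','M','E','X'] (['E','R','P','N','E','X','T'] ++ y) = ['E','R','P','N','E','X','T'] ++ pvSrep ['E','R','P','N','e','x','t'] ['O','M','E','X'] y := by
  simp [pvSrep, List.isPrefixOf]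

lemma pvPushW_2_4 (y : List Char) : pvSrep ['E','r','p','n','e','x','t'] ['O','M','E','X'] (['E','R','P','N','E','X','T'] ++ y) = ['E','R','P','N','E','X','T'] ++ pvSrep ['E','r','p','n','e','x','t'] ['O','M','E','X'] y := by
  simp [pvSrep, List.isPrefixOf]

lemma pvPushW_3_4 (y : List Char) : pvSrep ['e','r','p','n','e','x','t'] ['O','M','E','X'] (['E','R','P','N','E','X','T'] ++ y) = ['E','R','P','N','E','X','T'] ++ pvSrep ['e','r','p','n','e','x','t'] ['O','M','E','X'] y := by
  simp [pvSrep, List.isPrefixOf]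

lemma pvHit_1 (y : List Char) : pvSrep ['E','R','P','N','e','x','t'] ['O','M','E','X'] (['E','R','P','N','e','x','t'] ++ y) = ['O','M','E','X'] ++ pvSrep ['E','R','P','N','e','x','t'] ['O','M','E','X'] y := by
  simp [pvSrep, List.isPrefixOf]

lemma pvHit_2 (y : List Char) : pvSrep ['E','r','p','n','e','x','t'] ['O','M','E','X'] (['E','r','p','n','e','x','t'] ++ y) = ['O','M','E','X'] ++ pvSrep ['E','r','p','n','e','x','t'] ['O','M','E','X'] y := by
  simp [pvSrep, List.isPrefixOf]

lemma pvHit_3 (y : List Char) : pvSrep ['e','r','p','n','e','x','t'] ['O','M','E','X'] (['e','r','p','n','e','x','t'] ++ y) = ['O','M','E','X'] ++ pvSrep ['e','r','p','n','e','x','t'] ['O','M','E','X'] y := by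
  simp [pvSrep, List.isPrefixOf]

lemma pvHit_4 (y : List Char) : pvSrep ['E','R','P','N','E','X','T'] ['O','M','E','X'] (['E','R','P','N','E','X','T'] ++ y) = ['O','M','E','X'] ++ pvSrep ['E','R','P','N','E','X','T'] ['O','M','E','X'] y := by
  simp [pvSrep, List.isPrefixOf]

lemma pvScanHit_1 (y : List Char) : pvScan (['E','R','P','N','e','x','t'] ++ y) = ['O','M','E','X'] ++ pvScan y := by
  simp [pvScan, pvVariants, List.isPrefixOf]

lemma pvScanHit_2 (y : List Char) : pvScan (['E','r','p','n','e','x','t'] ++ y) = ['O','M','E','X'] ++ pvScan y := by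
  simp [pvScan, pvVariants, List.isPrefixOf]

lemma pvScanHit_3 (y : List Char) : pvScan (['e','r','p','n','e','x','t'] ++ y) = ['O','M','E','X'] ++ pvScan y := by
  simp [pvScan, pvVariants, List.isPrefixOf]

lemma pvScanHit_4 (y : List Char) : pvScan (['E','R','P','N','E','X','T'] ++ y) = ['O','M','E','X'] ++ pvScan y := by
  simp [pvScan, pvVariants, List.isPrefixOf]

lemma pvChain_scan (n : Nat) : ∀ l, l.length ≤ n →
    pvSrep "ERPNEXT".toList "OMEX".toList (pvSrep "erpnext".toList "OMEX".toList
      (pvSrep "Erpnext".toList "OMEX".toList (pvSrep "ERPNext".toList "OMEX".toList l)))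
    = pvScan l := by
  simp only [show "ERPNext".toList = ['E','R','P','N','e','x','t'] from rfl,
    show "Erpnext".toList = ['E','r','p','n','e','x','t'] from rfl,
    show "erpnext".toList = ['e','r','p','n','e','x','t'] from rfl,
    show "ERPNEXT".toList = ['E','R','P','N','E','X','T'] from rfl,
    show "OMEX".toList = ['O','M','E','X'] from rfl]
  induction n with
  | zero =>
    intro l hl
    have : l = [] := List.length_eq_zero_iff.mp (Nat.le_zero.mp hl)
    subst this
    simp [pvSrep, pvScan]
  | succ n ih =>
    intro l hl
    match l with
    | [] => simp [pvSrep, pvScan]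
    | c :: t =>
      simp only [List.length_cons, Nat.succ_le_succ_iff] at hl
      by_cases h1 : (['E','R','P','N','e','x','t'] : List Char).isPrefixOf (c :: t) = true
      · obtain ⟨x, hx⟩ := List.isPrefixOf_iff_prefix.mp h1
        have hxl : x.length ≤ n := by
          have := congrArg List.length hx; simp at this; omega
        rw [← hx, pvHit_1, pvPushOM_2, pvPushOM_3, pvPushOM_4, pvScanHit_1, ih x hxl]
      · by_cases h2 : (['E','r','p','n','e','x','t'] : List Char).isPrefixOf (c :: t) = true
        · obtain ⟨x, hx⟩ := List.isPrefixOf_iff_prefix.mp h2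
          have hxl : x.length ≤ n := by
            have := congrArg List.length hx; simp at this; omega
          rw [← hx, pvPushW_1_2, pvHit_2, pvPushOM_3, pvPushOM_4, pvScanHit_2, ih x hxl]
        · by_cases h3 : (['e','r','p','n','e','x','t'] : List Char).isPrefixOf (c :: t) = true
          · obtain ⟨x, hx⟩ := List.isPrefixOf_iff_prefix.mp h3
            have hxl : x.length ≤ n := by
              have := congrArg List.length hx; simp at this; omega
            rw [← hx, pvPushW_1_3, pvPushW_2_3, pvHit_3, pvPushOM_4, pvScanHit_3, ih x hxl]
          · by_cases h4 : (['E','R','P','N','E','X','T'] : List Char).isPrefixOf (c :: t) = true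
            · obtain ⟨x, hx⟩ := List.isPrefixOf_iff_prefix.mp h4
              have hxl : x.length ≤ n := by
                have := congrArg List.length hx; simp at this; omega
              rw [← hx, pvPushW_1_4, pvPushW_2_4, pvPushW_3_4, pvHit_4, pvScanHit_4, ih x hxl]
            · -- no variant starts here: every pass and the scan step over c
              have h1' := eq_false_of_ne_true h1
              have h2' := eq_false_of_ne_true h2
              have h3' := eq_false_of_ne_true h3
              have h4' := eq_false_of_ne_true h4
              have e1 : pvSrep ['E','R','P','N','e','x','t'] ['O','M','E','X'] (c :: t)
                  = c :: pvSrep ['E','R','P','N','e','x','t'] ['O','M','E','X'] t := by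
                rw [pvSrep]; simp [h1']
              have hp2 : (['E','r','p','n','e','x','t'] : List Char).isPrefixOf
                  (c :: pvSrep ['E','R','P','N','e','x','t'] ['O','M','E','X'] t) = false := by
                by_contra hcon
                have hb := Bool.of_not_eq_false hcon
                rw [← e1] at hb
                have := pvSrep_prefix_reflect "ERPNext".toList (c :: t).length (c :: t) le_rfl
                  ['E','r','p','n','e','x','t'] (by decide) hb
                exact h2 this
              have e2 : pvSrep ['E','r','p','n','e','x','t'] ['O','M','E','X']
                  (c :: pvSrep ['E','R','P','N','e','x','t'] ['O','M','E','X'] t)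
                  = c :: pvSrep ['E','r','p','n','e','x','t'] ['O','M','E','X']
                      (pvSrep ['E','R','P','N','e','x','t'] ['O','M','E','X'] t) := by
                rw [pvSrep]; simp [hp2]
              have hp3 : (['e','r','p','n','e','x','t'] : List Char).isPrefixOf
                  (c :: pvSrep ['E','r','p','n','e','x','t'] ['O','M','E','X']
                    (pvSrep ['E','R','P','N','e','x','t'] ['O','M','E','X'] t)) = false := by
                by_contra hcon
                have hb := Bool.of_not_eq_false hcon
                rw [← e2, ← e1] at hb
                have hs2 := pvSrep_prefix_reflect "Erpnext".toList
                  (pvSrep ['E','R','P','N','e','x','t'] ['O','M','E','X'] (c :: t)).length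
                  _ le_rfl ['e','r','p','n','e','x','t'] (by decide) hb
                have := pvSrep_prefix_reflect "ERPNext".toList (c :: t).length (c :: t) le_rfl
                  ['e','r','p','n','e','x','t'] (by decide) hs2
                exact h3 this
              have e3 : pvSrep ['e','r','p','n','e','x','t'] ['O','M','E','X']
                  (c :: pvSrep ['E','r','p','n','e','x','t'] ['O','M','E','X']
                    (pvSrep ['E','R','P','N','e','x','t'] ['O','M','E','X'] t))
                  = c :: pvSrep ['e','r','p','n','e','x','t'] ['O','M','E','X']
                      (pvSrep ['E','r','p','n','e','x','t'] ['O','M','E','X']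
                        (pvSrep ['E','R','P','N','e','x','t'] ['O','M','E','X'] t)) := by
                rw [pvSrep]; simp [hp3]
              have hp4 : (['E','R','P','N','E','X','T'] : List Char).isPrefixOf
                  (c :: pvSrep ['e','r','p','n','e','x','t'] ['O','M','E','X']
                    (pvSrep ['E','r','p','n','e','x','t'] ['O','M','E','X']
                      (pvSrep ['E','R','P','N','e','x','t'] ['O','M','E','X'] t))) = false := by
                by_contra hcon
                have hb := Bool.of_not_eq_false hcon
                rw [← e3, ← e2, ← e1] at hb
                have hs3 := pvSrep_prefix_reflect "erpnext".toList _ _ le_rfl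
                  ['E','R','P','N','E','X','T'] (by decide) hb
                have hs2 := pvSrep_prefix_reflect "Erpnext".toList _ _ le_rfl
                  ['E','R','P','N','E','X','T'] (by decide) hs3
                have := pvSrep_prefix_reflect "ERPNext".toList (c :: t).length (c :: t) le_rfl
                  ['E','R','P','N','E','X','T'] (by decide) hs2
                exact h4 this
              have e4 : pvSrep ['E','R','P','N','E','X','T'] ['O','M','E','X']
                  (c :: pvSrep ['e','r','p','n','e','x','t'] ['O','M','E','X']
                    (pvSrep ['E','r','p','n','e','x','t'] ['O','M','E','X']
                      (pvSrep ['E','R','P','N','e','x','t'] ['O','M','E','X'] t)))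
                  = c :: pvSrep ['E','R','P','N','E','X','T'] ['O','M','E','X']
                      (pvSrep ['e','r','p','n','e','x','t'] ['O','M','E','X']
                        (pvSrep ['E','r','p','n','e','x','t'] ['O','M','E','X']
                          (pvSrep ['E','R','P','N','e','x','t'] ['O','M','E','X'] t))) := by
                rw [pvSrep]; simp [hp4]
              have escan : pvScan (c :: t) = c :: pvScan t := by
                rw [pvScan]; simp [pvVariants, h1', h2', h3', h4']
              rw [e1, e2, e3, e4, escan, ih t hl]

lemma pvOcc_scan (n : Nat) : ∀ l, l.length ≤ n → pvOcc "ERPNext".toList (pvScan l) = false := by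
  induction n with
  | zero =>
    intro l hl
    have : l = [] := List.length_eq_zero_iff.mp (Nat.le_zero.mp hl)
    subst this
    simp [pvScan, pvOcc]
  | succ n ih =>
    intro l hl
    match l with
    | [] => simp [pvScan, pvOcc]
    | c :: t =>
      simp only [List.length_cons, Nat.succ_le_succ_iff] at hl
      rw [pvScan]
      by_cases hp : pvVariants.any (fun v => v.isPrefixOf (c :: t)) = true
      · rw [if_pos hp]
        have hdl : (List.drop 6 t).length ≤ n := by simp [List.length_drop]; omega
        rw [show ("OMEX".toList : List Char) = ['O','M','E','X'] from rfl]
        simp only [List.cons_append, List.nil_append, pvOcc]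
        rw [ih _ hdl]
        simp [List.isPrefixOf]
      · rw [if_neg hp]
        rw [pvOcc]
        have h2 : pvOcc "ERPNext".toList (pvScan t) = false := ih t hl
        have h1 : ("ERPNext".toList).isPrefixOf (c :: pvScan t) = false := by
          by_contra hcon
          have hb := Bool.of_not_eq_false hcon
          have hcons : pvScan (c :: t) = c :: pvScan t := by
            rw [pvScan, if_neg hp]
          rw [← hcons] at hb
          have := pvScan_prefix_reflect (c :: t).length (c :: t) le_rfl
            "ERPNext".toList (by decide) hb
          -- then "ERPNext" is a prefix of c :: t, so the any-check would fire
          apply hp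
          simp only [pvVariants, List.any_cons]
          rw [this]
          rfl
        rw [h1, h2]
        rfl

lemma pvFoldl_toList : ∀ (ps : List (String × String)) (s : String), (∀ p ∈ ps, p.1.toList ≠ []) →
    (List.foldl (fun t p => PySem.Str.replace t p.1 p.2) s ps).toList
      = List.foldl (fun (l : List Char) (p : String × String) => pvSrep p.1.toList p.2.toList l) s.toList ps := by
  intro ps
  induction ps with
  | nil => intro s _; simp
  | cons p ps ih =>
    intro s hne
    simp only [List.foldl_cons]
    rw [← pvReplace_eq p.1.toList p.2.toList s.toList (hne p List.mem_cons_self),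
      ← PySem.Str.toList_replace]
    exact ih _ (fun q hq => hne q (List.mem_cons_of_mem p hq))

lemma pvFoldl_id : ∀ (ps : List (String × String)) (l : List Char),
    (∀ p ∈ ps, pvOcc "ERPNext".toList p.1.toList = true) → pvOcc "ERPNext".toList l = false →
    List.foldl (fun (l : List Char) (p : String × String) => pvSrep p.1.toList p.2.toList l) l ps = l := by
  intro ps
  induction ps with
  | nil => intro l _ _; rfl
  | cons p ps ih =>
    intro l hocc hl
    simp only [List.foldl_cons]
    rw [pvSrep_id _ _ _ (hocc p List.mem_cons_self) hl]
    exact ih l (fun q hq => hocc q (List.mem_cons_of_mem p hq)) hl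

lemma pvMain (text : String) : replace_erpnext_in_text text = replace_erpnext_in_text_alt text := by
  apply String.toList_inj.mp
  rw [replace_erpnext_in_text, replace_erpnext_in_text_alt]
  rw [pvFoldl_toList pvReplacements text (by decide)]
  rw [show pvReplacements
      = [(("ERPNext" : String), ("OMEX" : String)), ("Erpnext", "OMEX"), ("erpnext", "OMEX"), ("ERPNEXT", "OMEX")]
        ++ pvReplacements.drop 4 from rfl]
  rw [List.foldl_append]
  simp only [List.foldl_cons, List.foldl_nil]
  rw [pvChain_scan text.toList.length text.toList le_rfl]
  rw [pvFoldl_id _ _ (by decide) (pvOcc_scan text.toList.length text.toList le_rfl)]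
  simp

-- ===== VERDICT (by name: the statement is the Claim_ definition above) =====
theorem replace_erpnext_in_text_spec : Claim_equal_replace_erpnext_in_text := by
  intro text _
  exact (pvMain text).symm ▸ rfl
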